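-- pv_equiv track=rewrite | github.com/takin6/algorithm-practice | codility/13/fib_frog.py | solution
-- ===== SOURCE A (Python) =====
-- def solution(A):
--     # adding banks
--     A.append(1)
--
--     # generating fib sequences up to len(A)
--     fib_seqs = [0, 1]
--     i = 2
--     while fib_seqs[-1] <= len(A)+1:
--         new_fib = fib_seqs[i-1] + fib_seqs[i-2]
--         if new_fib > len(A):
--             break
--         else:
--             fib_seqs.append(new_fib)
--         i += 1
--
--     # check if the frog can reach the other side with step 1
--     if len(A)+1 in fib_seqs:
--         return 1
--     fib_seqs = fib_seqs[1:]
--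
--     # generate dp table. mark the position the frog can reach in
--     # 1 step
--     dp = [-1] * len(A)
--     for jump in fib_seqs:
--         dp[jump-1] = 1
--
--     for x, leaf in enumerate(A):
--         if dp[x] > 0 and leaf == 1:
--             for jump in fib_seqs:
--                 if jump + x >= len(A):
--                     break
--                 else:
--                     if dp[x+jump]<0 or dp[x+jump] > dp[x]+1:
--                         dp[x+jump] = dp[x]+1
--
--     return dp[-1]
-- ===== SOURCE B (Python) =====
-- def solution(A):
--     # same bank append as the original (mutates A, like the original)
--     A.append(1)
--     n = len(A)
--
--     # fibonacci jump lengths 1, 2, 3, 5, ... up to n (distinct, ascending)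
--     fibs = []
--     a, b = 1, 2
--     while a <= n:
--         fibs.append(a)
--         a, b = b, a + b
--
--     # pull-style DP: dp[p] = fewest jumps to reach position p (None = unreachable),
--     # computed once per cell from its predecessors, left to right
--     dp = []
--     for p in range(n):
--         if (p + 1) in fibs:
--             dp.append(1)
--             continue
--         best = None
--         for j in fibs:
--             if j > p:
--                 break
--             x = p - j
--             if A[x] == 1 and dp[x] is not None:
--                 c = dp[x] + 1
--                 if best is None or c < best:
--                     best = c
--         dp.append(best)
--     return dp[-1] if dp[-1] is not None else -1
-- ===== Notes on version B (the rewrite author's own statement) =====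
-- stated objective: alternative
-- what changed: Replaces A's push-style relaxation of a mutable -1-sentinel int array (seed dp[j-1]=1 for every fib j, then for each leaf re-relax dp[x+j] with min) by a pull-style DP that computes each cell exactly once as an Option (None = unreachable) from its fib predecessors, with a distinct ascending fib list generated by a pair loop instead of A's indexed growing-list loop and without A's dead 'len(A)+1 in fib_seqs' early return (that test can never fire since all generated fibs are <= len(A)).
import Mathlib
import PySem

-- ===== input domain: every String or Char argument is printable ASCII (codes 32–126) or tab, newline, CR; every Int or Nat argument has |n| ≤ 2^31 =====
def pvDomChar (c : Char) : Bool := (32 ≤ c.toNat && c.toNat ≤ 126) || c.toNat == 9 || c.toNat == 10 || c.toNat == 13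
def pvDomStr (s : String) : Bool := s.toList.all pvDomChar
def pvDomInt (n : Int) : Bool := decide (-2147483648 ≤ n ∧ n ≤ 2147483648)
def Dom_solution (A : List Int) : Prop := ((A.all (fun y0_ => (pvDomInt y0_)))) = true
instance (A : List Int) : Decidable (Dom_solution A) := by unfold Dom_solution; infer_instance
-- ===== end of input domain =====

-- B replaces A's push-style -1-sentinel relaxation array by a pull-style Option-valued DP
-- computed once per cell (objective: alternative).  Both A and B append 1 to the caller's
-- list (the equivalence proved here is about the return value; B performs the same mutation).

-- ===== PORT A =====
-- while fib_seqs[-1] <= len(A)+1: ... (fuel-guarded; fuel only makes the recursion structural)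
def aFibGen (n : Int) : Nat → List Int → Int → List Int
  | 0, fs, _ => fs
  | fuel+1, fs, i =>
    if PySem.List.pyGetD fs (-1) 0 ≤ n + 1 then
      let nf := PySem.List.pyGetD fs (i - 1) 0 + PySem.List.pyGetD fs (i - 2) 0
      if nf > n then fs
      else aFibGen n fuel (fs ++ [nf]) (i + 1)
    else fs

-- for jump in fib_seqs: dp[jump-1] = 1
def aSeed : List Int → List Int → List Int
  | dp, [] => dp
  | dp, j :: rest => aSeed (PySem.List.pySetD dp (j - 1) 1) rest

-- inner 'for jump in fib_seqs' loop with its break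
def aInner (n x : Int) : List Int → List Int → List Int
  | dp, [] => dp
  | dp, j :: rest =>
    if j + x ≥ n then dp
    else
      let t := PySem.List.pyGetD dp (x + j) 0
      let v := PySem.List.pyGetD dp x 0 + 1
      aInner n x (if t < 0 ∨ t > v then PySem.List.pySetD dp (x + j) v else dp) rest

-- for x, leaf in enumerate(A): ...
def aMain (n : Int) (fibs : List Int) : List Int → List (Int × Int) → List Int
  | dp, [] => dp
  | dp, (x, leaf) :: rest =>
    aMain n fibs (if PySem.List.pyGetD dp x 0 > 0 ∧ leaf = 1 then aInner n x dp fibs else dp) rest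

def solution (A : List Int) : Int :=
  let AA := A ++ [1]
  let n : Int := PySem.List.len AA
  let fibs := aFibGen n (n.toNat + 4) [0, 1] 2
  if n + 1 ∈ fibs then 1
  else
    let fibs1 := PySem.List.slice fibs (some 1) none
    let dp := aSeed (PySem.List.pyRepeat [-1] n) fibs1
    PySem.List.pyGetD (aMain n fibs1 dp (PySem.List.enumerate AA 0)) (-1) 0

-- ===== PORT B =====
-- while a <= n: fibs.append(a); a, b = b, a+b   (fuel-guarded structural recursion)
def bFibGen (n : Int) : Nat → Int → Int → List Int
  | 0, _, _ => []
  | fuel+1, a, b => if a ≤ n then a :: bFibGen n fuel b (a + b) else []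

-- inner 'for j in fibs' min-collecting loop with its break
def bBest (AA : List Int) (dp : List (Option Int)) (p : Int) : List Int → Option Int → Option Int
  | [], best => best
  | j :: rest, best =>
    if j > p then best
    else
      let x := p - j
      bBest AA dp p rest
        (if PySem.List.pyGetD AA x 0 = 1 then
          match PySem.List.pyGetD dp x none with
          | none => best
          | some dx =>
            let c := dx + 1
            match best with
            | none => some c
            | some bv => if c < bv then some c else some bv
        else best)

-- body of one iteration of 'for p in range(n)'
def bStep (AA : List Int) (fibs : List Int) (dp : List (Option Int)) (p : Int) : Option Int :=
  if p + 1 ∈ fibs then some 1 else bBest AA dp p fibs none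

-- for p in range(n): dp.append(...)
def bBuild (AA : List Int) (fibs : List Int) : Nat → Int → List (Option Int) → List (Option Int)
  | 0, _, dp => dp
  | k+1, p, dp => bBuild AA fibs k (p + 1) (dp ++ [bStep AA fibs dp p])

def solution_alt (A : List Int) : Int :=
  let AA := A ++ [1]
  let n : Int := PySem.List.len AA
  let fibs := bFibGen n (n.toNat + 4) 1 2
  let dp := bBuild AA fibs AA.length 0 []
  match PySem.List.pyGetD dp (-1) none with
  | none => -1
  | some v => v

-- ===== PRECONDITION & SPEC =====
def Spec_solution (A : List Int) (out : Int) : Prop := out = solution_alt A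
instance (A : List Int) (out : Int) : Decidable (Spec_solution A out) := by unfold Spec_solution; infer_instance

-- ===== CLAIM (what is proved, stated in full; the proofs are below) =====
def Claim_equal_solution : Prop := ∀ (A : List Int), Dom_solution A → Spec_solution A (solution A)

-- ===== LEMMAS AND PROOFS =====

-- fib list emitted by A's while loop after the initial [0, 1]
def agen (n : Int) : Nat → Int → Int → List Int
  | 0, _, _ => []
  | fuel+1, x, y => if x + y > n then [] else (x + y) :: agen n fuel y (x + y)

-- -1 / value encoding relating A's int cells to B's Option cells
def encO : Option Int → Int
  | none => -1
  | some v => v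

def omin : Option Int → Int → Option Int
  | none, c => some c
  | some bv, c => some (min c bv)

lemma aFibGen_eq (n : Int) : ∀ (fuel : Nat) (pre : List Int) (x y : Int), y ≤ n + 1 →
    aFibGen n fuel (pre ++ [x, y]) ((pre.length : Int) + 2) = pre ++ [x, y] ++ agen n fuel x y := by
  intro fuel
  induction fuel with
  | zero => intro pre x y hy; simp [aFibGen, agen]
  | succ f ih =>
    intro pre x y hy
    simp only [aFibGen]
    have hlast : PySem.List.pyGetD (pre ++ [x, y]) (-1) 0 = y := by
      rw [show pre ++ [x, y] = (pre ++ [x]) ++ [y] by simp,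
        PySem.List.pyGetD_neg_one_append_singleton]
    have hg1 : PySem.List.pyGetD (pre ++ [x, y]) ((pre.length : Int) + 2 - 1) 0 = y := by
      have h1 : PySem.List.pyGet? ((pre ++ [x]) ++ [y]) ((pre ++ [x]).length : Int) = some y :=
        PySem.List.pyGet?_append_length (pre ++ [x]) [] y
      simp only [List.append_assoc, List.cons_append, List.nil_append, List.length_append,
        List.length_cons, List.length_nil] at h1
      simp only [PySem.List.pyGetD, show (pre.length : Int) + 2 - 1 = ((pre.length + 1 : Nat) : Int) by push_cast; ring,
        show pre.length + 1 = pre.length + 0 + 1 from rfl] at *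
      rw [show pre ++ [x, y] = pre ++ x :: [y] from rfl] at *
      simp only [h1, Option.getD_some]
    have hg2 : PySem.List.pyGetD (pre ++ [x, y]) ((pre.length : Int) + 2 - 2) 0 = x := by
      have h1 : PySem.List.pyGet? (pre ++ x :: [y]) (pre.length : Int) = some x :=
        PySem.List.pyGet?_append_length pre [y] x
      simp only [PySem.List.pyGetD, show (pre.length : Int) + 2 - 2 = (pre.length : Int) by ring]
      rw [show pre ++ [x, y] = pre ++ x :: [y] from rfl, h1]
      rfl
    rw [hlast, if_pos hy, hg1, hg2]
    by_cases h : x + y ≤ n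
    · rw [if_neg (by omega)]
      have hy2 : y + x = x + y := by ring
      rw [hy2]
      have hl : (pre ++ [x, y]) ++ [x + y] = (pre ++ [x]) ++ [y, x + y] := by simp
      have hidx : (pre.length : Int) + 2 + 1 = (((pre ++ [x]).length : Nat) : Int) + 2 := by
        simp
        omega
      rw [hl, hidx, ih (pre ++ [x]) y (x + y) (by omega)]
      simp only [agen, if_neg (show ¬ x + y > n by omega)]
      simp
    · rw [if_pos (by omega)]
      simp only [agen, if_pos (show x + y > n by omega)]
      simp

lemma agen_eq_bFibGen (n : Int) : ∀ (fuel : Nat) (x y : Int),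
    agen n fuel x y = bFibGen n fuel (x + y) (x + 2 * y) := by
  intro fuel
  induction fuel with
  | zero => intro x y; rfl
  | succ f ih =>
    intro x y
    show (if x + y > n then [] else (x + y) :: agen n f y (x + y)) = _
    rw [show bFibGen n (f+1) (x + y) (x + 2*y) =
        (if x + y ≤ n then (x + y) :: bFibGen n f (x + 2*y) ((x + y) + (x + 2*y)) else []) from rfl]
    by_cases h : x + y ≤ n
    · rw [if_neg (by omega), if_pos h, ih y (x + y)]
      ring_nf
    · rw [if_pos (by omega), if_neg (by omega)]

lemma bFibGen_mem_le (n : Int) : ∀ (fuel : Nat) (a b j : Int), j ∈ bFibGen n fuel a b → j ≤ n := by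
  intro fuel
  induction fuel with
  | zero => intro a b j h; simp [bFibGen] at h
  | succ f ih =>
    intro a b j h
    simp only [bFibGen] at h
    split at h
    · rcases List.mem_cons.1 h with rfl | h
      · omega
      · exact ih _ _ _ h
    · simp at h

lemma bFibGen_mem_ge (n : Int) : ∀ (fuel : Nat) (a b j : Int), 1 ≤ a → a ≤ b →
    j ∈ bFibGen n fuel a b → a ≤ j := by
  intro fuel
  induction fuel with
  | zero => intro a b j _ _ h; simp [bFibGen] at h
  | succ f ih =>
    intro a b j h1 h2 h
    simp only [bFibGen] at h
    split at h
    · rcases List.mem_cons.1 h with rfl | h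
      · omega
      · have := ih b (a + b) j (by omega) (by omega) h
        omega
    · simp at h

lemma bFibGen_pairwise (n : Int) : ∀ (fuel : Nat) (a b : Int), 1 ≤ a → a < b →
    (bFibGen n fuel a b).Pairwise (· < ·) := by
  intro fuel
  induction fuel with
  | zero => intro a b _ _; exact List.Pairwise.nil
  | succ f ih =>
    intro a b h1 h2
    simp only [bFibGen]
    split
    · exact List.pairwise_cons.2 ⟨fun j hj => lt_of_lt_of_le h2 (bFibGen_mem_ge n f b (a+b) j (by omega) (by omega) hj),
        ih b (a + b) (by omega) (by omega)⟩
    · exact List.Pairwise.nil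

-- the merge in bBest is omin
lemma merge_eq_omin (best : Option Int) (c : Int) :
    (match best with
      | none => some c
      | some bv => if c < bv then some c else some bv) = omin best c := by
  cases best with
  | none => rfl
  | some bv => simp only [omin, min_def]; split_ifs <;> first | rfl | (congr 1; omega)

lemma omin_comm (best : Option Int) (c d : Int) :
    omin (omin best c) d = omin (omin best d) c := by
  cases best <;> simp only [omin] <;> congr 1 <;> simp only [min_def] <;> split_ifs <;> omega

-- one unfolding of bBest with the merge written as omin
lemma bBest_cons (AA : List Int) (dp : List (Option Int)) (p j : Int) (rest : List Int)
    (best : Option Int) :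
    bBest AA dp p (j :: rest) best =
      if j > p then best
      else bBest AA dp p rest
        (if PySem.List.pyGetD AA (p - j) 0 = 1 then
          match PySem.List.pyGetD dp (p - j) none with
          | none => best
          | some dx => omin best (dx + 1)
        else best) := by
  simp only [bBest]
  split
  · rfl
  · congr 1
    split
    · cases PySem.List.pyGetD dp (p - j) none with
      | none => rfl
      | some dx => exact merge_eq_omin best (dx + 1)
    · rfl

lemma bBest_omin (AA : List Int) (dp : List (Option Int)) (p : Int) :
    ∀ (M : List Int) (best : Option Int) (c : Int),
      bBest AA dp p M (omin best c) = omin (bBest AA dp p M best) c := by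
  intro M
  induction M with
  | nil => intro best c; rfl
  | cons j rest ih =>
    intro best c
    rw [bBest_cons, bBest_cons]
    split
    · rfl
    · split
      · cases hdp : PySem.List.pyGetD dp (p - j) none with
        | none => exact ih best c
        | some dx =>
          show bBest AA dp p rest (omin (omin best c) (dx + 1)) =
            omin (bBest AA dp p rest (omin best (dx + 1))) c
          rw [omin_comm]
          exact ih _ c
      · exact ih best c

lemma bBest_empty_dp (AA : List Int) (p : Int) :
    ∀ (M : List Int) (best : Option Int), bBest AA ([] : List (Option Int)) p M best = best := by
  intro M
  induction M with
  | nil => intro best; rfl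
  | cons j rest ih =>
    intro best
    rw [bBest_cons]
    split
    · rfl
    · rw [show PySem.List.pyGetD ([] : List (Option Int)) (p - j) none = none by
        simp [PySem.List.pyGetD, PySem.List.pyGet?]]
      split <;> exact ih best

-- lookups agree on dp vs dp ++ [v] except at index dp.length; out of range both give none
lemma pyGetD_snoc_of_ne (dp : List (Option Int)) (v : Option Int) (x : Int)
    (hx : x ≠ (dp.length : Int)) (hx0 : 0 ≤ x) :
    PySem.List.pyGetD (dp ++ [v]) x none = PySem.List.pyGetD dp x none := by
  simp only [PySem.List.pyGetD, PySem.List.pyGet?_of_nonneg _ hx0]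
  by_cases hlt : x.toNat < dp.length
  · rw [List.getElem?_append_left hlt]
  · rw [List.getElem?_eq_none (by simp; omega), List.getElem?_eq_none (by omega)]

lemma pyGetD_snoc_self (dp : List (Option Int)) (v : Option Int) :
    PySem.List.pyGetD (dp ++ [v]) (dp.length : Int) none = v := by
  simp only [PySem.List.pyGetD, PySem.List.pyGet?_natCast, List.getElem?_concat_length,
    Option.getD_some]

lemma pyGetD_out_of_range (dp : List (Option Int)) (x : Int) (hx : (dp.length : Int) ≤ x) :
    PySem.List.pyGetD dp x none = none := by
  simp only [PySem.List.pyGetD, PySem.List.pyGet?_of_nonneg _ (by omega : (0:Int) ≤ x)]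
  rw [List.getElem?_eq_none (by omega)]
  rfl

-- appending a cell no scanned jump points at changes nothing
lemma bBest_snoc_not_mem (AA : List Int) (dp : List (Option Int)) (p : Int) (v : Option Int) :
    ∀ (M : List Int) (best : Option Int), (p - (dp.length : Int)) ∉ M →
      bBest AA (dp ++ [v]) p M best = bBest AA dp p M best := by
  intro M
  induction M with
  | nil => intro best _; rfl
  | cons j rest ih =>
    intro best hm
    rw [bBest_cons, bBest_cons]
    split
    · rfl
    · rw [pyGetD_snoc_of_ne dp v (p - j) (by intro h; exact hm (by simp; left; omega)) (by omega)]
      exact ih _ (fun h => hm (List.mem_cons_of_mem _ h))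

lemma bBest_snoc_none (AA : List Int) (dp : List (Option Int)) (p : Int) :
    ∀ (M : List Int) (best : Option Int),
      bBest AA (dp ++ [none]) p M best = bBest AA dp p M best := by
  intro M
  induction M with
  | nil => intro best; rfl
  | cons j rest ih =>
    intro best
    rw [bBest_cons, bBest_cons]
    split
    · rfl
    · by_cases hj : p - j = (dp.length : Int)
      · rw [hj, pyGetD_snoc_self, pyGetD_out_of_range dp _ (by omega)]
        exact ih _
      · rw [pyGetD_snoc_of_ne dp none (p - j) hj (by omega)]
        exact ih _

lemma bBest_snoc_some (AA : List Int) (dp : List (Option Int)) (p w : Int) :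
    ∀ (M : List Int), M.Pairwise (· < ·) → ∀ (best : Option Int),
      bBest AA (dp ++ [some w]) p M best =
        if (p - (dp.length : Int)) ∈ M ∧ PySem.List.pyGetD AA (dp.length : Int) 0 = 1
        then omin (bBest AA dp p M best) (w + 1)
        else bBest AA dp p M best := by
  intro M
  induction M with
  | nil => intro _ best; simp [bBest]
  | cons j rest ih =>
    intro hs best
    have hrest := (List.pairwise_cons.1 hs).2
    have hgt := (List.pairwise_cons.1 hs).1
    rw [bBest_cons, bBest_cons]
    by_cases hbig : j > p
    · rw [if_pos hbig, if_pos hbig]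
      have : (p - (dp.length : Int)) ∉ (j :: rest) := by
        intro hm
        rcases List.mem_cons.1 hm with h | h
        · omega
        · have := hgt _ h; omega
      rw [if_neg (by rw [not_and_or]; left; exact this)]
    · rw [if_neg hbig, if_neg hbig]
      by_cases hj : p - j = (dp.length : Int)
      · -- the appended cell is this jump's predecessor
        have hnot : (p - (dp.length : Int)) ∉ rest := by
          intro hm; have := hgt _ hm; omega
        have hmem : (p - (dp.length : Int)) ∈ (j :: rest) := by
          have hjj : p - (dp.length : Int) = j := by omega
          rw [hjj]; exact List.mem_cons_self
        rw [hj, pyGetD_snoc_self, pyGetD_out_of_range dp _ (by omega)]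
        by_cases hA : PySem.List.pyGetD AA (dp.length : Int) 0 = 1
        · have hc2 : (p - (dp.length : Int)) ∈ (j :: rest) ∧ PySem.List.pyGetD AA (dp.length : Int) 0 = 1 :=
            ⟨hmem, hA⟩
          rw [if_pos hA, if_pos hA, if_pos hc2]
          show bBest AA (dp ++ [some w]) p rest (omin best (w + 1)) = _
          rw [bBest_snoc_not_mem AA dp p (some w) rest _ hnot, bBest_omin]
        · rw [if_neg hA, if_neg hA, if_neg (by rw [not_and_or]; right; exact hA)]
          exact bBest_snoc_not_mem AA dp p (some w) rest _ hnot
      · rw [pyGetD_snoc_of_ne dp (some w) (p - j) hj (by omega)]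
        have hmem : ((p - (dp.length : Int)) ∈ (j :: rest)) ↔ ((p - (dp.length : Int)) ∈ rest) := by
          constructor
          · intro hm; rcases List.mem_cons.1 hm with h | h
            · omega
            · exact h
          · exact List.mem_cons_of_mem _
        rw [ih hrest]
        by_cases hc : (p - (dp.length : Int)) ∈ rest ∧ PySem.List.pyGetD AA (dp.length : Int) 0 = 1
        · have hc2 : (p - (dp.length : Int)) ∈ (j :: rest) ∧ PySem.List.pyGetD AA (dp.length : Int) 0 = 1 :=
            ⟨hmem.2 hc.1, hc.2⟩
          rw [if_pos hc, if_pos hc2]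
        · have hcj : ¬((p - (dp.length : Int)) ∈ (j :: rest) ∧ PySem.List.pyGetD AA (dp.length : Int) 0 = 1) := by
            rw [not_and_or] at hc ⊢
            rcases hc with h | h
            · left; rw [hmem]; exact h
            · right; exact h
          rw [if_neg hc, if_neg hcj]

lemma bBest_pos (AA : List Int) (dp : List (Option Int)) (p : Int)
    (hdp : ∀ o ∈ dp, ∀ c : Int, o = some c → 1 ≤ c) :
    ∀ (M : List Int) (best : Option Int), (∀ c : Int, best = some c → 1 ≤ c) →
      ∀ c : Int, bBest AA dp p M best = some c → 1 ≤ c := by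
  intro M
  induction M with
  | nil => intro best hb c hc; exact hb c hc
  | cons j rest ih =>
    intro best hb c hc
    rw [bBest_cons] at hc
    split at hc
    · exact hb c hc
    · split at hc
      · cases hdpx : PySem.List.pyGetD dp (p - j) none with
        | none => rw [hdpx] at hc; exact ih best hb c hc
        | some dx =>
          rw [hdpx] at hc
          have hdx : 1 ≤ dx := by
            have h1 : PySem.List.pyGet? dp (p - j) = some (some dx) := by
              cases hq : PySem.List.pyGet? dp (p - j) with
              | none => simp [PySem.List.pyGetD, hq] at hdpx
              | some o =>
                have ho : o = some dx := by simpa [PySem.List.pyGetD, hq] using hdpx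
                rw [ho]
            exact hdp _ (PySem.List.mem_of_pyGet?_eq_some dp h1) dx rfl
          refine ih _ ?_ c hc
          intro c' hc'
          cases best with
          | none =>
            simp only [omin, Option.some.injEq] at hc'
            omega
          | some bv =>
            have := hb bv rfl
            simp only [omin, Option.some.injEq, min_def] at hc'
            split_ifs at hc' <;> omega
      · exact ih best hb c hc

lemma bStep_pos (AA : List Int) (fibs : List Int) (dp : List (Option Int)) (p : Int)
    (hdp : ∀ o ∈ dp, ∀ c : Int, o = some c → 1 ≤ c) :
    ∀ c : Int, bStep AA fibs dp p = some c → 1 ≤ c := by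
  intro c hc
  unfold bStep at hc
  split at hc
  · rw [Option.some_inj] at hc; omega
  · exact bBest_pos AA dp p hdp fibs none (by intro c' h; cases h) c hc

lemma length_aSeed : ∀ (M : List Int) (dp : List Int), (aSeed dp M).length = dp.length := by
  intro M
  induction M with
  | nil => intro dp; rfl
  | cons j rest ih =>
    intro dp
    show (aSeed (PySem.List.pySetD dp (j - 1) 1) rest).length = _
    rw [ih, PySem.List.length_pySetD]

lemma length_aInner (n x : Int) : ∀ (M : List Int) (dp : List Int),
    (aInner n x dp M).length = dp.length := by
  intro M
  induction M with
  | nil => intro dp; rfl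
  | cons j rest ih =>
    intro dp
    simp only [aInner]
    split
    · rfl
    · rw [ih]
      split
      · rw [PySem.List.length_pySetD]
      · rfl

lemma length_aMain (n : Int) (fibs : List Int) : ∀ (E : List (Int × Int)) (dp : List Int),
    (aMain n fibs dp E).length = dp.length := by
  intro E
  induction E with
  | nil => intro dp; rfl
  | cons e rest ih =>
    intro dp
    obtain ⟨x, leaf⟩ := e
    show (aMain n fibs _ rest).length = _
    rw [ih]
    split
    · rw [length_aInner]
    · rfl

lemma length_bBuild (AA : List Int) (fibs : List Int) : ∀ (k : Nat) (p : Int) (dp : List (Option Int)),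
    (bBuild AA fibs k p dp).length = dp.length + k := by
  intro k
  induction k with
  | zero => intro p dp; simp [bBuild]
  | succ f ih =>
    intro p dp
    show (bBuild AA fibs f (p + 1) (dp ++ [bStep AA fibs dp p])).length = _
    rw [ih]
    simp
    omega

lemma aSeed_getElem? : ∀ (M : List Int) (dp : List Int),
    (∀ j ∈ M, 1 ≤ j ∧ j ≤ (dp.length : Int)) →
    ∀ q : Nat, (aSeed dp M)[q]? = if ((q : Int) + 1) ∈ M then some 1 else dp[q]? := by
  intro M
  induction M with
  | nil => intro dp _ q; simp [aSeed]
  | cons j rest ih =>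
    intro dp hj q
    have hj1 := (hj j List.mem_cons_self).1
    have hj2 := (hj j List.mem_cons_self).2
    have hset : PySem.List.pySetD dp (j - 1) 1 = dp.set (j - 1).toNat 1 :=
      PySem.List.pySetD_of_nonneg dp 1 (by omega)
    show (aSeed (PySem.List.pySetD dp (j - 1) 1) rest)[q]? = _
    rw [ih _ (by
      intro j' hj'
      have := hj j' (List.mem_cons_of_mem _ hj')
      rw [PySem.List.length_pySetD]
      exact this)]
    by_cases hr : ((q : Int) + 1) ∈ rest
    · rw [if_pos hr, if_pos (List.mem_cons_of_mem _ hr)]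
    · rw [if_neg hr, hset]
      by_cases he : (q : Int) + 1 = j
      · have hmem : ((q : Int) + 1) ∈ (j :: rest) := List.mem_cons.2 (Or.inl (by omega))
        rw [if_pos hmem]
        have hq : (j - 1).toNat = q := by omega
        rw [hq, List.getElem?_set_self (by omega)]
      · rw [if_neg (by
          intro hm
          rcases List.mem_cons.1 hm with h | h
          · exact he h
          · exact hr h)]
        rw [List.getElem?_set_ne (by omega)]

lemma aInner_getElem? (n x : Int) (hx0 : 0 ≤ x) :
    ∀ (M : List Int) (dp : List Int), M.Pairwise (· ≤ ·) → (∀ j ∈ M, 1 ≤ j) →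
      x < (dp.length : Int) → 0 ≤ PySem.List.pyGetD dp x 0 →
      ∀ q : Nat, (aInner n x dp M)[q]? =
        if ((q : Int) - x) ∈ M ∧ (q : Int) < n then
          (dp[q]?).map (fun t =>
            if t < 0 ∨ t > PySem.List.pyGetD dp x 0 + 1 then PySem.List.pyGetD dp x 0 + 1 else t)
        else dp[q]? := by
  intro M
  induction M with
  | nil => intro dp _ _ _ _ q; simp [aInner]
  | cons j rest ih =>
    intro dp hs h1 hxlen hw0 q
    have hrest := (List.pairwise_cons.1 hs).2
    have hle := (List.pairwise_cons.1 hs).1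
    have hj1 : 1 ≤ j := h1 j List.mem_cons_self
    simp only [aInner]
    split
    · -- break: x + j ≥ n
      rename_i hbr
      rw [if_neg (by
        rintro ⟨hm, hq⟩
        rcases List.mem_cons.1 hm with h | h
        · omega
        · have := hle _ h; omega)]
    · rename_i hbr
      set w := PySem.List.pyGetD dp x 0 with hwdef
      set t := PySem.List.pyGetD dp (x + j) 0 with htdef
      set dp' := if t < 0 ∨ t > w + 1 then PySem.List.pySetD dp (x + j) (w + 1) else dp with hdp'
      have hlen' : dp'.length = dp.length := by
        rw [hdp']; split
        · rw [PySem.List.length_pySetD]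
        · rfl
      have hget' : ∀ r : Nat, dp'[r]? = if ((r : Int)) = x + j then
          (dp[r]?).map (fun u => if u < 0 ∨ u > w + 1 then w + 1 else u) else dp[r]? := by
        intro r
        rw [hdp']
        by_cases hr : ((r : Int)) = x + j
        · rw [if_pos hr]
          by_cases hrange : r < dp.length
          · have hdpr : dp[r]? = some dp[r] := List.getElem?_eq_getElem hrange
            have ht_eq : t = dp[r] := by
              rw [htdef, ← hr, PySem.List.pyGetD_natCast, List.getD_eq_getElem?_getD, hdpr]
              rfl
            split
            · rename_i hcond
              rw [PySem.List.pySetD_of_nonneg dp _ (by omega),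
                show (x + j).toNat = r by omega, List.getElem?_set_self hrange, hdpr]
              simp only [Option.map_some]
              rw [if_pos (by rw [← ht_eq]; exact hcond)]
            · rename_i hcond
              rw [hdpr]
              simp only [Option.map_some]
              rw [if_neg (by rw [← ht_eq]; exact hcond)]
          · have hdpr : dp[r]? = none := List.getElem?_eq_none (by omega)
            split
            · rw [PySem.List.pySetD_of_nonneg dp _ (by omega),
                List.getElem?_eq_none (by simp; omega), hdpr]
              rfl
            · rw [hdpr]; rfl
        · rw [if_neg hr]
          split
          · rw [PySem.List.pySetD_of_nonneg dp _ (by omega),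
              List.getElem?_set_ne (by omega)]
          · rfl
      have hwget' : PySem.List.pyGetD dp' x 0 = w := by
        rw [show PySem.List.pyGetD dp' x 0 = (dp'[x.toNat]?).getD 0 by
            simp only [PySem.List.pyGetD, PySem.List.pyGet?_of_nonneg _ hx0]]
        rw [hget' x.toNat, if_neg (by omega)]
        rw [hwdef]
        simp only [PySem.List.pyGetD, PySem.List.pyGet?_of_nonneg _ hx0]
      rw [ih dp' hrest (fun j' hj' => h1 j' (List.mem_cons_of_mem _ hj')) (by omega)
        (by rw [hwget']; exact hw0) q, hwget', hget' q]
      by_cases hqj : (q : Int) = x + j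
      · have hqn : (q : Int) < n := by omega
        have hmemj : ((q : Int) - x) ∈ (j :: rest) := List.mem_cons.2 (Or.inl (by omega))
        have hcj : (((q : Int) - x) ∈ (j :: rest) ∧ (q : Int) < n) := ⟨hmemj, hqn⟩
        rw [if_pos hqj, if_pos hcj]
        by_cases hmr : ((q : Int) - x) ∈ rest
        · have hcr : (((q : Int) - x) ∈ rest ∧ (q : Int) < n) := ⟨hmr, hqn⟩
          rw [if_pos hcr, Option.map_map]
          congr 1
          funext u
          simp only [Function.comp_apply]
          by_cases hcond : u < 0 ∨ u > w + 1
          · rw [if_pos hcond, if_neg (by omega)]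
          · rw [if_neg hcond, if_neg hcond]
        · have hcr : ¬(((q : Int) - x) ∈ rest ∧ (q : Int) < n) := fun h => hmr h.1
          rw [if_neg hcr]
      · rw [if_neg hqj]
        have hmem : (((q : Int) - x) ∈ (j :: rest)) ↔ (((q : Int) - x) ∈ rest) := by
          constructor
          · intro hm
            rcases List.mem_cons.1 hm with h | h
            · omega
            · exact h
          · exact List.mem_cons_of_mem _
        by_cases hc : (((q : Int) - x) ∈ rest ∧ (q : Int) < n)
        · have hc2 : (((q : Int) - x) ∈ (j :: rest) ∧ (q : Int) < n) := ⟨hmem.2 hc.1, hc.2⟩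
          rw [if_pos hc, if_pos hc2]
        · have hc2 : ¬(((q : Int) - x) ∈ (j :: rest) ∧ (q : Int) < n) := fun h => hc ⟨hmem.1 h.1, h.2⟩
          rw [if_neg hc, if_neg hc2]

-- the simulation invariant: A's relaxed array is pointwise encO of B's recurrence values
lemma sim (AA : List Int) (L : List Int) (hL1 : ∀ j ∈ L, 1 ≤ j)
    (hLs : L.Pairwise (· < ·)) (hL0 : 1 ∈ L) :
    ∀ (rest : List Int) (x : Nat) (adp : List Int) (bdp : List (Option Int)),
      bdp.length = x → x ≤ AA.length → AA.drop x = rest → adp.length = AA.length →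
      (∀ o ∈ bdp, ∀ c : Int, o = some c → 1 ≤ c) →
      (∀ q : Nat, q < AA.length → adp[q]? = some (encO (bStep AA L bdp (q : Int)))) →
      (∀ q : Nat, q < x → bdp[q]? = some (bStep AA L bdp (q : Int))) →
      ∀ q : Nat,
        (aMain (AA.length : Int) (1 :: L) adp (PySem.List.enumerate rest (x : Int)))[q]? =
        ((bBuild AA L rest.length (x : Int) bdp)[q]?).map encO := by
  intro rest
  induction rest with
  | nil =>
    intro x adp bdp h1 hxle h2 h3 h5 h4 h6 q
    have hx : x = AA.length := by
      have := congrArg List.length h2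
      simp at this
      omega
    show adp[q]? = (bdp[q]?).map encO
    by_cases hq : q < AA.length
    · rw [h4 q hq, h6 q (by omega)]
      rfl
    · rw [List.getElem?_eq_none (by omega), List.getElem?_eq_none (by omega)]
      rfl
  | cons leaf rest' ih =>
    intro x adp bdp h1 hxle h2 h3 h5 h4 h6 q
    have hxlt : x < AA.length := by
      have := congrArg List.length h2
      simp at this
      omega
    have hleaf : AA[x]? = some leaf := by
      have h0 : (AA.drop x)[0]? = some leaf := by rw [h2]; rfl
      rwa [List.getElem?_drop, Nat.add_zero] at h0
    have hdrop' : AA.drop (x + 1) = rest' := by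
      have h0 : (AA.drop x).drop 1 = rest' := by rw [h2]; rfl
      rwa [List.drop_drop] at h0
    have hleafD : PySem.List.pyGetD AA (x : Int) 0 = leaf := by
      rw [PySem.List.pyGetD_natCast, List.getD_eq_getElem?_getD, hleaf]
      rfl
    set v := bStep AA L bdp (x : Int) with hvdef
    set e := encO v with hedef
    have hvpos : ∀ c : Int, v = some c → 1 ≤ c := bStep_pos AA L bdp _ h5
    have hgx : PySem.List.pyGetD adp (x : Int) 0 = e := by
      rw [PySem.List.pyGetD_natCast, List.getD_eq_getElem?_getD, h4 x hxlt]
      rfl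
    have hlenb : (bdp.length : Int) = (x : Int) := by rw [h1]
    -- appending v never changes the recurrence value at already-built cells
    have hstep_lo : ∀ q : Int, q ≤ (x : Int) → bStep AA L (bdp ++ [v]) q = bStep AA L bdp q := by
      intro q hq
      unfold bStep
      split
      · rfl
      · cases hv : v with
        | none => rw [bBest_snoc_none]
        | some w =>
          rw [bBest_snoc_some AA bdp q w L hLs, hlenb,
            if_neg (by rintro ⟨hm, _⟩; have := hL1 _ hm; omega)]
    have h6' : ∀ q : Nat, q < x + 1 → (bdp ++ [v])[q]? = some (bStep AA L (bdp ++ [v]) (q : Int)) := by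
      intro q hq
      by_cases hqx : q < x
      · rw [List.getElem?_append_left (by omega), h6 q hqx, hstep_lo _ (by omega)]
      · have hqeq : q = x := by omega
        subst hqeq
        have hcat : (bdp ++ [v])[q]? = some v := by
          rw [show q = bdp.length from h1.symm]
          exact List.getElem?_concat_length
        rw [hcat, hstep_lo _ (le_refl _)]
    have h5' : ∀ o ∈ bdp ++ [v], ∀ c : Int, o = some c → 1 ≤ c := by
      intro o ho c hc
      rcases List.mem_append.1 ho with h | h
      · exact h5 o h c hc
      · rw [List.mem_singleton.1 h] at hc
        exact hvpos c hc
    have hcast : (x : Int) + 1 = ((x + 1 : Nat) : Int) := by push_cast; ring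
    rw [PySem.List.enumerate_cons]
    show (aMain (AA.length : Int) (1 :: L) _ (PySem.List.enumerate rest' ((x : Int) + 1)))[q]? = _
    rw [hcast]
    by_cases hbr : PySem.List.pyGetD adp (x : Int) 0 > 0 ∧ leaf = 1
    · -- A expands a reached leaf: v = some w and A relaxes the successors
      rw [if_pos hbr]
      obtain ⟨he, hleaf1⟩ := hbr
      rw [hgx] at he
      have hv : ∃ w : Int, v = some w := by
        cases hv : v with
        | none => rw [hedef, hv] at he; simp [encO] at he
        | some w => exact ⟨w, rfl⟩
      obtain ⟨w, hv⟩ := hv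
      have hwe : e = w := by rw [hedef, hv]; rfl
      have hw1 : 1 ≤ w := hvpos w hv
      have hM1 : ∀ j ∈ (1 :: L), 1 ≤ j := by
        intro j hj
        rcases List.mem_cons.1 hj with rfl | hj
        · omega
        · exact hL1 _ hj
      have hMs : (1 :: L).Pairwise (· ≤ ·) := by
        exact List.pairwise_cons.2 ⟨fun a ha => hL1 a ha, hLs.imp (fun h => le_of_lt h)⟩
      have hA1 : PySem.List.pyGetD AA ((bdp.length : Int)) 0 = 1 := by
        rw [hlenb, hleafD, hleaf1]
      have hinner := aInner_getElem? (AA.length : Int) (x : Int) (by omega) (1 :: L) adp hMs hM1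
        (by omega) (by rw [hgx]; omega)
      have h4' : ∀ q : Nat, q < AA.length →
          (aInner (AA.length : Int) (x : Int) adp (1 :: L))[q]? =
          some (encO (bStep AA L (bdp ++ [v]) (q : Int))) := by
        intro q hq
        rw [hinner q, hgx]
        by_cases hm : ((q : Int) - (x : Int)) ∈ L
        · have hmM : (((q : Int) - (x : Int)) ∈ (1 :: L) ∧ (q : Int) < (AA.length : Int)) :=
            ⟨List.mem_cons_of_mem _ hm, by omega⟩
          rw [if_pos hmM, h4 q hq]
          unfold bStep
          by_cases hseed : ((q : Int) + 1) ∈ L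
          · rw [if_pos hseed, if_pos hseed]
            show some (if (1 : Int) < 0 ∨ 1 > e + 1 then e + 1 else 1) = some (encO (some 1))
            rw [if_neg (by rw [hwe]; omega)]
            rfl
          · rw [if_neg hseed, if_neg hseed, hv,
              bBest_snoc_some AA bdp (q : Int) w L hLs,
              if_pos ⟨by rw [hlenb]; exact hm, hA1⟩]
            cases hu : bBest AA bdp (q : Int) L none with
            | none =>
              show some (if (encO none) < 0 ∨ (encO none) > e + 1 then e + 1 else encO none) = _
              rw [if_pos (by show (-1 : Int) < 0 ∨ _ ; left; omega)]
              rw [hwe]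
              rfl
            | some c =>
              have hc1 : 1 ≤ c := bBest_pos AA bdp (q : Int) h5 L none (by intro c' h; cases h) c hu
              show some (if c < 0 ∨ c > e + 1 then e + 1 else c) = some (encO (omin (some c) (w + 1)))
              rw [hwe]
              show _ = some (encO (some (min (w + 1) c)))
              by_cases hcw : c > w + 1
              · rw [if_pos (Or.inr hcw)]
                show _ = some (min (w + 1) c)
                rw [min_eq_left (by omega)]
              · rw [if_neg (by omega)]
                show _ = some (min (w + 1) c)
                rw [min_eq_right (by omega)]
        · have hmM : ¬(((q : Int) - (x : Int)) ∈ (1 :: L) ∧ (q : Int) < (AA.length : Int)) := by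
            rintro ⟨hmm, _⟩
            rcases List.mem_cons.1 hmm with h | h
            · rw [h] at hm; exact hm hL0
            · exact hm h
          rw [if_neg hmM, h4 q hq]
          unfold bStep
          split
          · rfl
          · rw [hv, bBest_snoc_some AA bdp (q : Int) w L hLs,
              if_neg (by rintro ⟨hmm, _⟩; rw [hlenb] at hmm; exact hm hmm)]
      exact ih (x + 1) _ (bdp ++ [v]) (by simp; omega) (by omega) hdrop'
        (by rw [length_aInner]; exact h3) h5' h4' h6' q
    · -- A skips this position; then v = none or the position is not a leaf
      rw [if_neg hbr]
      have hstep_eq : ∀ q : Int, bStep AA L (bdp ++ [v]) q = bStep AA L bdp q := by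
        intro q
        cases hv : v with
        | none =>
          unfold bStep
          split
          · rfl
          · rw [bBest_snoc_none]
        | some w =>
          have hw1 : 1 ≤ w := hvpos w hv
          have hleafne : ¬(PySem.List.pyGetD AA ((bdp.length : Int)) 0 = 1) := by
            rw [hlenb, hleafD]
            intro hle1
            exact hbr ⟨by rw [hgx, hedef, hv]; show encO (some w) > 0; show w > 0; omega, hle1⟩
          unfold bStep
          split
          · rfl
          · rw [bBest_snoc_some AA bdp q w L hLs, if_neg (by rintro ⟨_, hc⟩; exact hleafne hc)]
      have h4' : ∀ q : Nat, q < AA.length →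
          adp[q]? = some (encO (bStep AA L (bdp ++ [v]) (q : Int))) := by
        intro q hq
        rw [hstep_eq, h4 q hq]
      exact ih (x + 1) adp (bdp ++ [v]) (by simp; omega) (by omega) hdrop' h3 h5' h4' h6' q

-- ===== VERDICT

lemma solution_equiv (A : List Int) : solution A = solution_alt A := by
  unfold solution solution_alt
  simp only [PySem.List.len_eq, Int.toNat_natCast, PySem.List.pyRepeat_singleton,
    PySem.List.slice_from_one]
  set AA := A ++ [1] with hAA
  have hAlen : 1 ≤ AA.length := by rw [hAA]; simp
  have hn1 : (1 : Int) ≤ (AA.length : Int) := by exact_mod_cast hAlen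
  set fuel := AA.length + 4 with hfuel
  set n : Int := (AA.length : Int) with hn
  set L := bFibGen n fuel 1 2 with hL
  -- A's fib list is 0 :: 1 :: L
  have haFib : aFibGen n fuel [0, 1] 2 = 0 :: 1 :: L := by
    have h := aFibGen_eq n fuel [] 0 1 (by omega)
    simp only [List.nil_append, List.length_nil, Nat.cast_zero, zero_add] at h
    rw [h, agen_eq_bFibGen n fuel 0 1]
    norm_num
    rfl
  have hL1 : ∀ j ∈ L, 1 ≤ j := fun j hj => bFibGen_mem_ge n fuel 1 2 j (by omega) (by omega) hj
  have hLle : ∀ j ∈ L, j ≤ n := fun j hj => bFibGen_mem_le n fuel 1 2 j hj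
  have hLs : L.Pairwise (· < ·) := bFibGen_pairwise n fuel 1 2 (by omega) (by omega)
  have hL0 : (1 : Int) ∈ L := by
    rw [hL, hfuel, show AA.length + 4 = (AA.length + 3) + 1 from rfl]
    show (1 : Int) ∈ (if (1 : Int) ≤ n then (1 : Int) :: bFibGen n (AA.length + 3) 2 (1 + 2) else [])
    rw [if_pos hn1]
    exact List.mem_cons_self
  rw [haFib]
  have hnotmem : n + 1 ∉ (0 :: 1 :: L) := by
    intro hm
    rcases List.mem_cons.1 hm with h | hm
    · omega
    · rcases List.mem_cons.1 hm with h | hm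
      · omega
      · have := hLle _ hm; omega
  rw [if_neg hnotmem]
  simp only [List.tail_cons]
  set dp0 := aSeed (List.replicate AA.length (-1)) (1 :: L) with hdp0
  have hdp0len : dp0.length = AA.length := by
    rw [hdp0, length_aSeed, List.length_replicate]
  -- initial invariant: the seeded array is encO of the recurrence over the empty bdp
  have h4 : ∀ q : Nat, q < AA.length → dp0[q]? = some (encO (bStep AA L [] (q : Int))) := by
    intro q hq
    have hseed := aSeed_getElem? (1 :: L) (List.replicate AA.length (-1)) (by
      intro j hj
      rcases List.mem_cons.1 hj with rfl | hj
      · constructor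
        · omega
        · rw [List.length_replicate]; omega
      · refine ⟨hL1 _ hj, ?_⟩
        rw [List.length_replicate]
        exact hLle _ hj) q
    rw [hdp0, hseed]
    have hmem : (((q : Int) + 1) ∈ (1 :: L)) ↔ (((q : Int) + 1) ∈ L) := by
      constructor
      · intro hm
        rcases List.mem_cons.1 hm with h | hm
        · rw [show (q : Int) + 1 = 1 from h]; exact hL0
        · exact hm
      · exact List.mem_cons_of_mem _
    unfold bStep
    rw [bBest_empty_dp]
    by_cases hs : ((q : Int) + 1) ∈ L
    · rw [if_pos (hmem.2 hs), if_pos hs]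
      rfl
    · rw [if_neg (fun hm => hs (hmem.1 hm)), if_neg hs,
        List.getElem?_replicate_of_lt (by omega)]
      rfl
  have hmain := sim AA L hL1 hLs hL0 AA 0 dp0 [] rfl (by omega) rfl hdp0len
    (by intro o ho; cases ho) h4
    (by intro q hq; exact absurd hq (Nat.not_lt_zero q)) (AA.length - 1)
  simp only [Nat.cast_zero] at hmain
  -- both sides read the last cell
  set adpF := aMain n (1 :: L) dp0 (PySem.List.enumerate AA 0) with hadpF
  set bdpF := bBuild AA L AA.length 0 [] with hbdpF
  have hadpFlen : adpF.length = AA.length := by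
    rw [hadpF, length_aMain, hdp0len]
  have hbdpFlen : bdpF.length = AA.length := by
    rw [hbdpF, length_bBuild]
    simp
  have hA_last : PySem.List.pyGetD adpF (-1) 0 = adpF[AA.length - 1]'(by omega) := by
    rw [PySem.List.pyGetD_neg_ofNat adpF 1 0 (by omega) (by omega)]
    congr 1
    omega
  have hB_last : PySem.List.pyGetD bdpF (-1) none = bdpF[AA.length - 1]'(by omega) := by
    rw [PySem.List.pyGetD_neg_ofNat bdpF 1 none (by omega) (by omega)]
    congr 1
    omega
  rw [hA_last, hB_last]
  have hget : adpF[AA.length - 1]'(by omega) = encO (bdpF[AA.length - 1]'(by omega)) := by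
    have h1 : adpF[AA.length - 1]? = some (adpF[AA.length - 1]'(by omega)) :=
      List.getElem?_eq_getElem (by omega)
    have h2 : bdpF[AA.length - 1]? = some (bdpF[AA.length - 1]'(by omega)) :=
      List.getElem?_eq_getElem (by omega)
    rw [h1, h2] at hmain
    simpa using hmain
  rw [hget]
  cases bdpF[AA.length - 1]'(by omega) <;> rfl

-- ===== VERDICT (by name: the statement is the Claim_ definition above) =====
theorem solution_spec : Claim_equal_solution := by
  intro A _
  exact solution_equiv A
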